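-- pv_equiv track=rewrite | github.com/kkuikkya/forPractice | strInterleaving.py | allOfInterleavingsDP
-- ===== SOURCE A (Python) =====
-- def allOfInterleavingsDP(A, B):
--
--     memo = {} # memo[(i,j)] 는 길이 i와 j 까지 인터리빙을 만듦
--     memo[(0,0)] = [""]
--
--     nA = len(A)
--     nB = len(B)
--
--     # base case A, B의 길이가 0 인경우
--     for i in range(1, nA + 1):
--         memo[(i,0)] = [A[:i]]
--
--     for j in range(1, nB + 1):
--         memo[(0,j)] = [B[:j]]
--
--     for i in range(1, nA + 1):
--         for j in range(1, nB + 1):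
--             memo[(i,j)] = [x + A[i-1]for x in memo[(i-1,j)]] + [y + B[j-1] for y in memo[(i, j-1)]]
--
--     return memo[(nA,nB)]
-- ===== SOURCE B (Python) =====
-- def allOfInterleavingsDP(A, B):
--     # Top-down recursion on the LAST character instead of a bottom-up DP table:
--     # solve(i, j) returns all interleavings of A[:i] and B[:j] in the same order.
--     def solve(i, j):
--         if j == 0:
--             return [A[:i]]
--         if i == 0:
--             return [B[:j]]
--         return [x + A[i - 1] for x in solve(i - 1, j)] + \
--                [y + B[j - 1] for y in solve(i, j - 1)]
--     return solve(len(A), len(B))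
-- ===== Notes on version B (the rewrite author's own statement) =====
-- stated objective: simpler
-- what changed: The bottom-up dict-keyed (i,j) DP table and its three staged loops are replaced by a plain top-down recursive function solve(i,j) on the last characters, with base cases A[:i] / B[:j]; no table or loops remain.
import Mathlib
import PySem

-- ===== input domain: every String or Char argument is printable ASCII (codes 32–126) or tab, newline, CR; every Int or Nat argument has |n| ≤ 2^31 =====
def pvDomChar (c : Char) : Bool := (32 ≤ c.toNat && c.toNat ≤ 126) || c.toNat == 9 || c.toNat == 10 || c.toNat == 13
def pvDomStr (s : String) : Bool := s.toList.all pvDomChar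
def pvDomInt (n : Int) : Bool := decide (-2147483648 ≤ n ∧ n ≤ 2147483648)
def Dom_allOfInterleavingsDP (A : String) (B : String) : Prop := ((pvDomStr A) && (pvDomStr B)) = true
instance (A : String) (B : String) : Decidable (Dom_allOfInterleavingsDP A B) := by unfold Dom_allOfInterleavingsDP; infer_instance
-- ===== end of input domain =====

-- B replaces A's bottom-up dict-keyed DP table and its three staged loops by a
-- plain top-down recursion on the last characters; same values in the same order.

-- ===== PORT A =====
-- literal transliteration of A: a dict memo keyed by (i,j); memo[(i-1,j)] etc. are
-- always present when read, so `(get? …).getD []` is Python's memo[…] here, and the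
-- characters A[i-1], B[j-1] are always in range, so `(pyGet? …).getD ' '` is Python's A[i-1].
def allOfInterleavingsDP (A : String) (B : String) : List String :=
  let memo : PySem.Dict (Int × Int) (List String) :=
    PySem.Dict.insert PySem.Dict.empty (0, 0) [""]
  let nA : Int := PySem.Str.len A
  let nB : Int := PySem.Str.len B
  let memo := (PySem.List.pyRange 1 (nA + 1) 1).foldl
    (fun m i => m.insert (i, 0) [PySem.Str.slice A none (some i)]) memo
  let memo := (PySem.List.pyRange 1 (nB + 1) 1).foldl
    (fun m j => m.insert (0, j) [PySem.Str.slice B none (some j)]) memo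
  let memo := (PySem.List.pyRange 1 (nA + 1) 1).foldl
    (fun m i => (PySem.List.pyRange 1 (nB + 1) 1).foldl
      (fun m j => m.insert (i, j)
        (((m.get? (i - 1, j)).getD []).map
            (fun x => x.push ((PySem.Str.pyGet? A (i - 1)).getD ' ')) ++
          ((m.get? (i, j - 1)).getD []).map
            (fun y => y.push ((PySem.Str.pyGet? B (j - 1)).getD ' ')))) m) memo
  (memo.get? (nA, nB)).getD []

-- ===== PORT B =====
-- literal transliteration of Source B's `solve`: branch `j == 0` first (so (0,0) gives
-- A[:0] = ""), then `i == 0`, else the two recursive calls in Source B's order; the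
-- indices i-1, j-1 are in range, so `(pyGet? …).getD ' '` is Python's A[i-1].
def pySolve (A B : String) : Nat → Nat → List String
  | i, 0 => [PySem.Str.slice A none (some (i : Int))]
  | 0, j + 1 => [PySem.Str.slice B none (some ((j + 1 : Nat) : Int))]
  | i + 1, j + 1 =>
      (pySolve A B i (j + 1)).map
          (fun x => x.push ((PySem.Str.pyGet? A (i : Int)).getD ' ')) ++
        (pySolve A B (i + 1) j).map
          (fun y => y.push ((PySem.Str.pyGet? B (j : Int)).getD ' '))
  termination_by i j => (i, j)

def allOfInterleavingsDP_alt (A : String) (B : String) : List String :=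
  pySolve A B A.toList.length B.toList.length

-- ===== PRECONDITION & SPEC =====
def Spec_allOfInterleavingsDP (A : String) (B : String) (out : List String) : Prop := out = allOfInterleavingsDP_alt A B
instance (A : String) (B : String) (out : List String) : Decidable (Spec_allOfInterleavingsDP A B out) := by unfold Spec_allOfInterleavingsDP; infer_instance

-- ===== CLAIM (what is proved, stated in full; the proofs are below) =====
def Claim_equal_allOfInterleavingsDP : Prop := ∀ (A : String) (B : String), Dom_allOfInterleavingsDP A B → Spec_allOfInterleavingsDP A B (allOfInterleavingsDP A B)

-- ===== LEMMAS AND PROOFS =====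

lemma pySolve_base_A (A B : String) (i : Nat) :
    pySolve A B i 0 = [PySem.Str.slice A none (some (i : Int))] := by
  cases i <;> simp [pySolve]

lemma pySolve_base_B (A B : String) (j : Nat) :
    pySolve A B 0 (j + 1) = [PySem.Str.slice B none (some ((j + 1 : Nat) : Int))] := by
  simp [pySolve]

lemma pySolve_step (A B : String) (i j : Nat) :
    pySolve A B (i + 1) (j + 1) =
      (pySolve A B i (j + 1)).map
          (fun x => x.push ((PySem.Str.pyGet? A (i : Int)).getD ' ')) ++
        (pySolve A B (i + 1) j).map
          (fun y => y.push ((PySem.Str.pyGet? B (j : Int)).getD ' ')) := by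
  simp [pySolve]

lemma str_slice_zero (s : String) :
    PySem.Str.slice s none (some ((0 : Nat) : Int)) = "" := by
  simp [PySem.Str.slice, PySem.Chars.slice, PySem.List.slice_to]

lemma pySolve_zero_zero (A B : String) : pySolve A B 0 0 = [""] := by
  rw [pySolve_base_A, str_slice_zero]

-- generic loop invariant for `for v in range(c+1, b+1): s = f(s, v)`
lemma foldl_pyRange_inv {σ : Type} (f : σ → Int → σ) (b : Nat) (P : σ → Nat → Prop)
    (hstep : ∀ s c, c < b → P s c → P (f s ((c : Int) + 1)) (c + 1)) :
    ∀ c s, c ≤ b → P s c →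
      P ((PySem.List.pyRange ((c : Int) + 1) ((b : Int) + 1) 1).foldl f s) b := by
  have key : ∀ k c s, b - c = k → c ≤ b → P s c →
      P ((PySem.List.pyRange ((c : Int) + 1) ((b : Int) + 1) 1).foldl f s) b := by
    intro k
    induction k with
    | zero =>
      intro c s hk hcb hP
      have hcb' : c = b := by omega
      subst hcb'
      rw [PySem.List.pyRange_one_eq_nil (by omega)]
      simpa using hP
    | succ k ih =>
      intro c s hk hcb hP
      have hlt : c < b := by omega
      rw [PySem.List.pyRange_one_cons (by omega)]
      simp only [List.foldl_cons]
      have h1 := hstep s c hlt hP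
      have h2 := ih (c + 1) (f s ((c : Int) + 1)) (by omega) (by omega) h1
      have e : ((c : Int) + 1 + 1) = (((c + 1 : Nat) : Int) + 1) := by push_cast; ring
      rw [e]
      exact h2
  exact fun c s hcb hP => key (b - c) c s rfl hcb hP

-- "every cell (p, q) admitted by S holds the recurrence value"
def Filled (A B : String) (n m : Nat) (d : PySem.Dict (Int × Int) (List String))
    (S : Nat → Nat → Prop) : Prop :=
  ∀ p q : Nat, p ≤ n → q ≤ m → S p q →
    d.get? ((p : Int), (q : Int)) = some (pySolve A B p q)

lemma stageA1 (A B : String) (n m : Nat) :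
    Filled A B n m
      ((PySem.List.pyRange 1 ((n : Int) + 1) 1).foldl
        (fun m i => m.insert (i, 0) [PySem.Str.slice A none (some i)])
        (PySem.Dict.insert PySem.Dict.empty (0, 0) [""]))
      (fun p q => q = 0 ∧ p ≤ n) := by
  have hstep : ∀ d c, c < n →
      Filled A B n m d (fun p q => q = 0 ∧ p ≤ c) →
      Filled A B n m
        ((fun (m : PySem.Dict (Int × Int) (List String)) i =>
            m.insert (i, 0) [PySem.Str.slice A none (some i)]) d ((c : Int) + 1))
        (fun p q => q = 0 ∧ p ≤ c + 1) := by
    intro d c _ hP p q hp hq hS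
    obtain ⟨hq0, hpc⟩ := hS
    subst hq0
    dsimp only
    have e : ((c : Int) + 1) = (((c + 1 : Nat)) : Int) := by push_cast; ring
    rw [e, PySem.Dict.get?_insert]
    by_cases hpk : p = c + 1
    · subst hpk
      rw [if_pos (by simp), pySolve_base_A]
    · rw [if_neg (fun hcontra => hpk (by simp at hcontra; omega))]
      exact hP p 0 hp hq ⟨rfl, by omega⟩
  have hbase :
      Filled A B n m (PySem.Dict.insert PySem.Dict.empty (0, 0) [""])
        (fun p q => q = 0 ∧ p ≤ 0) := by
    intro p q hp hq hS
    obtain ⟨hq0, hp0⟩ := hS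
    have : p = 0 := by omega
    subst this; subst hq0
    simp only [Nat.cast_zero]
    rw [PySem.Dict.get?_insert_self, pySolve_zero_zero]
  have h := foldl_pyRange_inv
    (fun (m : PySem.Dict (Int × Int) (List String)) i =>
      m.insert (i, 0) [PySem.Str.slice A none (some i)]) n
    (fun d r => Filled A B n m d (fun p q => q = 0 ∧ p ≤ r)) hstep 0 _
    (Nat.zero_le n) hbase
  simp only [Nat.cast_zero, zero_add] at h
  exact h

lemma stageA2 (A B : String) (n m : Nat) :
    Filled A B n m
      ((PySem.List.pyRange 1 ((m : Int) + 1) 1).foldl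
        (fun d j => d.insert (0, j) [PySem.Str.slice B none (some j)])
        ((PySem.List.pyRange 1 ((n : Int) + 1) 1).foldl
          (fun m i => m.insert (i, 0) [PySem.Str.slice A none (some i)])
          (PySem.Dict.insert PySem.Dict.empty (0, 0) [""])))
      (fun p q => q = 0 ∨ (p = 0 ∧ q ≤ m)) := by
  have hstep : ∀ d c, c < m →
      Filled A B n m d (fun p q => q = 0 ∨ (p = 0 ∧ q ≤ c)) →
      Filled A B n m
        ((fun (d : PySem.Dict (Int × Int) (List String)) j =>
            d.insert (0, j) [PySem.Str.slice B none (some j)]) d ((c : Int) + 1))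
        (fun p q => q = 0 ∨ (p = 0 ∧ q ≤ c + 1)) := by
    intro d c _ hP p q hp hq hS
    dsimp only
    have e : ((c : Int) + 1) = (((c + 1 : Nat)) : Int) := by push_cast; ring
    rw [e, PySem.Dict.get?_insert]
    by_cases hpk : p = 0 ∧ q = c + 1
    · obtain ⟨rfl, rfl⟩ := hpk
      rw [if_pos (by simp), pySolve_base_B]
    · rw [if_neg (fun hcontra => hpk (by simp at hcontra; omega))]
      apply hP p q hp hq
      rcases hS with h0 | ⟨hp0, hqc⟩
      · exact Or.inl h0
      · by_cases hq1 : q ≤ c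
        · exact Or.inr ⟨hp0, hq1⟩
        · exact absurd ⟨hp0, by omega⟩ hpk
  have hbase :
      Filled A B n m
        ((PySem.List.pyRange 1 ((n : Int) + 1) 1).foldl
          (fun m i => m.insert (i, 0) [PySem.Str.slice A none (some i)])
          (PySem.Dict.insert PySem.Dict.empty (0, 0) [""]))
        (fun p q => q = 0 ∨ (p = 0 ∧ q ≤ 0)) := by
    intro p q hp hq hS
    apply stageA1 A B n m p q hp hq
    rcases hS with h0 | ⟨_, hq0⟩
    · exact ⟨h0, hp⟩
    · exact ⟨by omega, hp⟩
  have h := foldl_pyRange_inv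
    (fun (d : PySem.Dict (Int × Int) (List String)) j =>
      d.insert (0, j) [PySem.Str.slice B none (some j)]) m
    (fun d r => Filled A B n m d (fun p q => q = 0 ∨ (p = 0 ∧ q ≤ r))) hstep 0 _
    (Nat.zero_le m) hbase
  simp only [Nat.cast_zero, zero_add] at h
  exact h

lemma stageA3 (A B : String) (n m : Nat) :
    Filled A B n m
      ((PySem.List.pyRange 1 ((n : Int) + 1) 1).foldl
        (fun d i => (PySem.List.pyRange 1 ((m : Int) + 1) 1).foldl
          (fun d j => d.insert (i, j)
            (((d.get? (i - 1, j)).getD []).map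
                (fun x => x.push ((PySem.Str.pyGet? A (i - 1)).getD ' ')) ++
              ((d.get? (i, j - 1)).getD []).map
                (fun y => y.push ((PySem.Str.pyGet? B (j - 1)).getD ' ')))) d)
        ((PySem.List.pyRange 1 ((m : Int) + 1) 1).foldl
          (fun d j => d.insert (0, j) [PySem.Str.slice B none (some j)])
          ((PySem.List.pyRange 1 ((n : Int) + 1) 1).foldl
            (fun m i => m.insert (i, 0) [PySem.Str.slice A none (some i)])
            (PySem.Dict.insert PySem.Dict.empty (0, 0) [""]))))
      (fun p q => q = 0 ∨ p = 0 ∨ p ≤ n) := by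
  have hostep : ∀ d r, r < n →
      Filled A B n m d (fun p q => q = 0 ∨ p = 0 ∨ p ≤ r) →
      Filled A B n m
        ((fun (d : PySem.Dict (Int × Int) (List String)) i =>
            (PySem.List.pyRange 1 ((m : Int) + 1) 1).foldl
              (fun d j => d.insert (i, j)
                (((d.get? (i - 1, j)).getD []).map
                    (fun x => x.push ((PySem.Str.pyGet? A (i - 1)).getD ' ')) ++
                  ((d.get? (i, j - 1)).getD []).map
                    (fun y => y.push ((PySem.Str.pyGet? B (j - 1)).getD ' ')))) d)
          d ((r : Int) + 1))
        (fun p q => q = 0 ∨ p = 0 ∨ p ≤ r + 1) := by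
    intro d r hr hP
    dsimp only
    have er : ((r : Int) + 1) = (((r + 1 : Nat)) : Int) := by push_cast; ring
    rw [er]
    have histep : ∀ d c, c < m →
        Filled A B n m d
          (fun p q => q = 0 ∨ p = 0 ∨ p < r + 1 ∨ (p = r + 1 ∧ q ≤ c)) →
        Filled A B n m
          ((fun (d : PySem.Dict (Int × Int) (List String)) j =>
              d.insert (((r + 1 : Nat) : Int), j)
                (((d.get? (((r + 1 : Nat) : Int) - 1, j)).getD []).map
                    (fun x => x.push ((PySem.Str.pyGet? A (((r + 1 : Nat) : Int) - 1)).getD ' ')) ++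
                  ((d.get? (((r + 1 : Nat) : Int), j - 1)).getD []).map
                    (fun y => y.push ((PySem.Str.pyGet? B (j - 1)).getD ' '))))
            d ((c : Int) + 1))
          (fun p q => q = 0 ∨ p = 0 ∨ p < r + 1 ∨ (p = r + 1 ∧ q ≤ c + 1)) := by
      intro d c hc hPd
      dsimp only
      have e1 : (((r + 1 : Nat) : Int)) - 1 = ((r : Nat) : Int) := by push_cast; ring
      have e2 : ((c : Int) + 1) - 1 = ((c : Nat) : Int) := by ring
      have ec : ((c : Int) + 1) = (((c + 1 : Nat)) : Int) := by push_cast; ring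
      rw [e1, e2, ec]
      have hv : (((d.get? (((r : Nat) : Int), ((c + 1 : Nat) : Int))).getD []).map
            (fun x => x.push ((PySem.Str.pyGet? A ((r : Nat) : Int)).getD ' ')) ++
          ((d.get? (((r + 1 : Nat) : Int), ((c : Nat) : Int))).getD []).map
            (fun y => y.push ((PySem.Str.pyGet? B ((c : Nat) : Int)).getD ' '))) =
          pySolve A B (r + 1) (c + 1) := by
        rw [hPd r (c + 1) (by omega) (by omega) (Or.inr (Or.inr (Or.inl (by omega)))),
          hPd (r + 1) c (by omega) (by omega) (Or.inr (Or.inr (Or.inr ⟨rfl, le_rfl⟩))),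
          pySolve_step]
        simp
      intro p q hp hq hS
      rw [PySem.Dict.get?_insert]
      by_cases hpk : p = r + 1 ∧ q = c + 1
      · obtain ⟨rfl, rfl⟩ := hpk
        rw [if_pos rfl]
        exact congrArg some hv
      · rw [if_neg (fun hcontra => hpk (by simp at hcontra; omega))]
        apply hPd p q hp hq
        rcases hS with h0 | h0 | h0 | ⟨hpe, hqe⟩
        · exact Or.inl h0
        · exact Or.inr (Or.inl h0)
        · exact Or.inr (Or.inr (Or.inl h0))
        · by_cases hq1 : q ≤ c
          · exact Or.inr (Or.inr (Or.inr ⟨hpe, hq1⟩))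
          · exact absurd ⟨hpe, by omega⟩ hpk
    have hibase :
        Filled A B n m d
          (fun p q => q = 0 ∨ p = 0 ∨ p < r + 1 ∨ (p = r + 1 ∧ q ≤ 0)) := by
      intro p q hp hq hS
      apply hP p q hp hq
      rcases hS with h0 | h0 | h0 | ⟨hpe, hqe⟩
      · exact Or.inl h0
      · exact Or.inr (Or.inl h0)
      · exact Or.inr (Or.inr (by omega))
      · exact Or.inl (by omega)
    have h := foldl_pyRange_inv
      (fun (d : PySem.Dict (Int × Int) (List String)) j =>
        d.insert (((r + 1 : Nat) : Int), j)
          (((d.get? (((r + 1 : Nat) : Int) - 1, j)).getD []).map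
              (fun x => x.push ((PySem.Str.pyGet? A (((r + 1 : Nat) : Int) - 1)).getD ' ')) ++
            ((d.get? (((r + 1 : Nat) : Int), j - 1)).getD []).map
              (fun y => y.push ((PySem.Str.pyGet? B (j - 1)).getD ' ')))) m
      (fun d c => Filled A B n m d
        (fun p q => q = 0 ∨ p = 0 ∨ p < r + 1 ∨ (p = r + 1 ∧ q ≤ c)))
      histep 0 d (Nat.zero_le m) hibase
    simp only [Nat.cast_zero, zero_add] at h
    intro p q hp hq hS
    apply h p q hp hq
    rcases hS with h0 | h0 | h0
    · exact Or.inl h0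
    · exact Or.inr (Or.inl h0)
    · rcases Nat.lt_or_ge p (r + 1) with h1 | h1
      · exact Or.inr (Or.inr (Or.inl h1))
      · exact Or.inr (Or.inr (Or.inr ⟨by omega, hq⟩))
  have hobase :
      Filled A B n m
        ((PySem.List.pyRange 1 ((m : Int) + 1) 1).foldl
          (fun d j => d.insert (0, j) [PySem.Str.slice B none (some j)])
          ((PySem.List.pyRange 1 ((n : Int) + 1) 1).foldl
            (fun m i => m.insert (i, 0) [PySem.Str.slice A none (some i)])
            (PySem.Dict.insert PySem.Dict.empty (0, 0) [""])))
        (fun p q => q = 0 ∨ p = 0 ∨ p ≤ 0) := by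
    intro p q hp hq hS
    apply stageA2 A B n m p q hp hq
    rcases hS with h0 | h0 | h0
    · exact Or.inl h0
    · exact Or.inr ⟨h0, hq⟩
    · exact Or.inr ⟨by omega, hq⟩
  have h := foldl_pyRange_inv
    (fun (d : PySem.Dict (Int × Int) (List String)) i =>
      (PySem.List.pyRange 1 ((m : Int) + 1) 1).foldl
        (fun d j => d.insert (i, j)
          (((d.get? (i - 1, j)).getD []).map
              (fun x => x.push ((PySem.Str.pyGet? A (i - 1)).getD ' ')) ++
            ((d.get? (i, j - 1)).getD []).map
              (fun y => y.push ((PySem.Str.pyGet? B (j - 1)).getD ' ')))) d) n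
    (fun d r => Filled A B n m d (fun p q => q = 0 ∨ p = 0 ∨ p ≤ r)) hostep 0 _
    (Nat.zero_le n) hobase
  simp only [Nat.cast_zero, zero_add] at h
  exact h

lemma A_result (A B : String) :
    allOfInterleavingsDP A B = pySolve A B A.toList.length B.toList.length := by
  unfold allOfInterleavingsDP
  simp only [PySem.Str.len_eq]
  rw [stageA3 A B A.toList.length B.toList.length A.toList.length B.toList.length
    le_rfl le_rfl (Or.inr (Or.inr le_rfl))]
  rfl

-- ===== VERDICT (by name: the statement is the Claim_ definition above) =====
theorem allOfInterleavingsDP_spec : Claim_equal_allOfInterleavingsDP := by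
  intro A B _
  unfold Spec_allOfInterleavingsDP allOfInterleavingsDP_alt
  rw [A_result]
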